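-- pv_equiv track=rewrite | github.com/ysungJ/Assignment | Bio-Computing/Assignment3.py | Long_Repeat_Segment
-- ===== SOURCE A (Python) =====
-- def Long_Repeat_Segment(SEQ):
--     n = len(SEQ)
--     repeat = []
--     # 세그먼트의 길이가 2,3,4까지 반복되는 경우에
--     for length in range(2, 5):
--         #각 세그먼트를 확인하여 반복되는 세그먼트를 찾는데
--         for i in range(n - length * 2 + 1):
--             segment = SEQ[i:i + length]
--             #다른 위치에서 같은 세그먼트를 찾으면 반복 리스트에 추가한다.
--             for j in range(i + length, n - length + 1):
--                 if SEQ[j:j + length] == segment: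
--                     repeat.append(segment)
--     #가장 길게 반복된 시퀀스가 있으면 반환
--     if repeat:
--         return max(repeat, key=len)
--     else:
--         #없는 경우에 반복이 없다고 반환
--         return "No repeats"
-- ===== SOURCE B (Python) =====
-- def Long_Repeat_Segment(SEQ):
--     n = len(SEQ)
--     # Try lengths from longest to shortest; return the first (leftmost) segment
--     # that re-occurs later with no overlap.  No list of repeats, no max().
--     for length in (4, 3, 2):
--         for i in range(n - 2 * length + 1):
--             segment = SEQ[i:i + length]
--             if segment in SEQ[i + length:]:
--                 return segment
--     return "No repeats"
-- ===== Notes on version B (the rewrite author's own statement) =====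
-- stated objective: faster
-- what changed: Instead of enumerating every repeated (i,j) pair of every length into a list and taking max(key=len), B tries lengths 4,3,2 in descending order and returns the first segment that re-occurs in the remaining suffix (substring containment with early return), so no repeat list and no max pass are ever built.
import Mathlib
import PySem

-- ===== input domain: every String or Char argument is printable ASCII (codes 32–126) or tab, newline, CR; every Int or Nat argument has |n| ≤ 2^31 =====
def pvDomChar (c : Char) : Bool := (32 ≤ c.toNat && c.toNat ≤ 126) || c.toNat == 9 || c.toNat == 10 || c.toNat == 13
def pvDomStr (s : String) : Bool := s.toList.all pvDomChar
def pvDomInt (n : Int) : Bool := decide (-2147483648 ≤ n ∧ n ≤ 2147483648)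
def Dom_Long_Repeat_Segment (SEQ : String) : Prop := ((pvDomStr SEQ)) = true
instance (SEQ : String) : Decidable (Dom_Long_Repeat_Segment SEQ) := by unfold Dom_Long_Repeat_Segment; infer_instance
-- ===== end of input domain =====

-- B replaces A's exhaustive pair enumeration plus max(key=len) by a descending-length scan
-- that returns the first segment contained in the remaining suffix (early return, no repeat list).

-- ===== PORT A =====
-- Python's `if repeat: return max(repeat, key=len)` is ported through PySem.List.max?
-- (Python's max: first maximal element; it returns none exactly when the list is empty).
def Long_Repeat_Segment (SEQ : String) : String :=
  let cs := SEQ.toList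
  let n : Int := PySem.Chars.len cs
  let rep : List (List Char) :=
    (PySem.List.pyRange 2 5).foldl (fun rep length =>
      (PySem.List.pyRange 0 (n - length * 2 + 1)).foldl (fun rep i =>
        let segment := PySem.List.slice cs (some i) (some (i + length))
        (PySem.List.pyRange (i + length) (n - length + 1)).foldl (fun rep j =>
          if PySem.List.slice cs (some j) (some (j + length)) == segment then
            rep ++ [segment]
          else rep) rep) rep) []
  match PySem.List.max? rep (fun s => s.length) with
  | some m => String.ofList m
  | none => "No repeats"

-- ===== PORT B =====
-- Source B's inner loop for one length: `for i in range(n - 2*length + 1): … if segment in SEQ[i+length:]: return segment`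
def lrsFind (cs : List Char) (length : Int) : Option (List Char) :=
  (PySem.List.pyRange 0 ((PySem.Chars.len cs) - 2 * length + 1)).findSome? (fun i =>
    let segment := PySem.List.slice cs (some i) (some (i + length))
    if PySem.Chars.isIn segment (PySem.List.slice cs (some (i + length)) none) then
      some segment
    else none)

def Long_Repeat_Segment_alt (SEQ : String) : String :=
  match ([4, 3, 2] : List Int).findSome? (lrsFind SEQ.toList) with
  | some segment => String.ofList segment
  | none => "No repeats"

-- ===== PRECONDITION & SPEC =====
def Spec_Long_Repeat_Segment (SEQ : String) (out : String) : Prop := out = Long_Repeat_Segment_alt SEQ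
instance (SEQ : String) (out : String) : Decidable (Spec_Long_Repeat_Segment SEQ out) := by unfold Spec_Long_Repeat_Segment; infer_instance

-- ===== CLAIM (what is proved, stated in full; the proofs are below) =====
def Claim_equal_Long_Repeat_Segment : Prop := ∀ (SEQ : String), Dom_Long_Repeat_Segment SEQ → Spec_Long_Repeat_Segment SEQ (Long_Repeat_Segment SEQ)

-- ===== LEMMAS AND PROOFS =====

-- the segment A compares at position i, and the list of repeats A accumulates for one length
def lrsSeg (cs : List Char) (length i : Int) : List Char :=
  PySem.List.slice cs (some i) (some (i + length))

def lrsBlk (cs : List Char) (length : Int) : List (List Char) :=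
  (PySem.List.pyRange 0 ((PySem.Chars.len cs) - length * 2 + 1)).flatMap (fun i =>
    ((PySem.List.pyRange (i + length) ((PySem.Chars.len cs) - length + 1)).filter
      (fun j => lrsSeg cs length j == lrsSeg cs length i)).map (fun _ => lrsSeg cs length i))

-- A's accumulated list is the three per-length blocks in order
theorem lrs_A_unfold (SEQ : String) :
    Long_Repeat_Segment SEQ =
      match PySem.List.max?
          (lrsBlk SEQ.toList 2 ++ lrsBlk SEQ.toList 3 ++ lrsBlk SEQ.toList 4)
          (fun s => s.length) with
      | some m => String.ofList m
      | none => "No repeats" := by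
  unfold Long_Repeat_Segment lrsBlk lrsSeg
  rw [show PySem.List.pyRange 2 5 = [2, 3, 4] from by decide]
  simp only [List.foldl_cons, List.foldl_nil, PySem.List.foldl_append_if,
    PySem.List.foldl_append_eq_flatMap, List.nil_append, List.append_assoc]

theorem lrs_head?_flatMap {α β : Type} (g : α → List β) (l : List α) :
    (l.flatMap g).head? = l.findSome? (fun i => (g i).head?) := by
  induction l with
  | nil => rfl
  | cons a t ih =>
    simp [List.findSome?, List.head?_append, ih, Option.or]
    cases (g a).head? <;> simp

theorem lrs_findSome?_congr {α β : Type} (f g : α → Option β) (l : List α)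
    (h : ∀ x ∈ l, f x = g x) : l.findSome? f = l.findSome? g := by
  induction l with
  | nil => rfl
  | cons a t ih =>
    simp only [List.findSome?_cons, h a (by simp), ih (fun x hx => h x (by simp [hx]))]

-- `segment in SEQ[i+length:]` holds iff some later, non-overlapping window equals the segment
theorem lrs_core (cs : List Char) (L i : Nat) (hL : 0 < L) (hin : i + 2*L ≤ cs.length) :
    PySem.Chars.isIn (List.take L (List.drop i cs)) (List.drop (i+L) cs) = true ↔
    ∃ j : Nat, i + L ≤ j ∧ j + L ≤ cs.length ∧ List.take L (List.drop j cs) = List.take L (List.drop i cs) := by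
  rw [PySem.Chars.isIn_iff_infix]
  have hlen : (List.take L (List.drop i cs)).length = L := by simp; omega
  constructor
  · rintro ⟨pre, suf, hps⟩
    refine ⟨i + L + pre.length, by omega, ?_, ?_⟩
    · have := congrArg List.length hps
      simp [hlen] at this
      omega
    · have hd : List.drop (i + L + pre.length) cs = List.take L (List.drop i cs) ++ suf := by
        rw [show i + L + pre.length = (i + L) + pre.length by omega, ← List.drop_drop, ← hps,
          List.append_assoc, List.drop_left]
      rw [hd, List.take_left' hlen]
  · rintro ⟨j, h1, h2, h3⟩
    have hpre : List.take L (List.drop j cs) <+: List.drop j cs := List.take_prefix _ _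
    rw [h3] at hpre
    have hsuf : List.drop j cs <:+ List.drop (i+L) cs := by
      have := List.drop_suffix (j - (i+L)) (List.drop (i+L) cs)
      rwa [List.drop_drop, show (i + L) + (j - (i+L)) = j by omega] at this
    exact hpre.isInfix.trans hsuf.isInfix

theorem lrs_seg_eq (cs : List Char) (L i : Int) (h0 : 0 ≤ i) (hL : 0 ≤ L) :
    lrsSeg cs L i = List.take L.toNat (List.drop i.toNat cs) := by
  unfold lrsSeg
  rw [PySem.List.slice_toNat cs h0 (by omega)]
  congr 1
  omega

theorem lrs_blk_len (cs : List Char) (L : Int) (hL : 0 < L) :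
    ∀ x ∈ lrsBlk cs L, x.length = L.toNat := by
  intro x hx
  unfold lrsBlk at hx
  rw [List.mem_flatMap] at hx
  obtain ⟨i, hi, hxi⟩ := hx
  rw [PySem.List.mem_pyRange_one] at hi
  rw [List.mem_map] at hxi
  obtain ⟨j, _, rfl⟩ := hxi
  rw [lrs_seg_eq cs L i hi.1 (by omega)]
  have hlen : (PySem.Chars.len cs) = (cs.length : Int) := by simp [PySem.Chars.len]
  rw [hlen] at hi
  simp
  omega

-- the head of A's per-length block is exactly what B's per-length scan returns
theorem lrs_blk_head (cs : List Char) (L : Int) (hL : 0 < L) :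
    (lrsBlk cs L).head? = lrsFind cs L := by
  unfold lrsBlk lrsFind
  rw [lrs_head?_flatMap]
  rw [show (PySem.Chars.len cs) - L * 2 + 1 = (PySem.Chars.len cs) - 2 * L + 1 by ring]
  apply lrs_findSome?_congr
  intro i hi
  rw [PySem.List.mem_pyRange_one] at hi
  have hn : PySem.Chars.len cs = (cs.length : Int) := by simp [PySem.Chars.len]
  rw [hn] at hi
  have h0 : 0 ≤ i := hi.1
  have hbound : i.toNat + 2 * L.toNat ≤ cs.length := by omega
  have hseg : lrsSeg cs L i = List.take L.toNat (List.drop i.toNat cs) :=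
    lrs_seg_eq cs L i h0 (by omega)
  show (((PySem.List.pyRange (i + L) ((PySem.Chars.len cs) - L + 1)).filter
      (fun j => lrsSeg cs L j == lrsSeg cs L i)).map (fun _ => lrsSeg cs L i)).head? =
    (if PySem.Chars.isIn (PySem.List.slice cs (some i) (some (i + L)))
        (PySem.List.slice cs (some (i + L)) none) then
      some (PySem.List.slice cs (some i) (some (i + L)))
    else none)
  rw [List.head?_map]
  have hfrom : PySem.List.slice cs (some (i + L)) none = List.drop (i.toNat + L.toNat) cs := by
    rw [PySem.List.slice_from cs (by omega)]
    congr 1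
    omega
  have hsl : PySem.List.slice cs (some i) (some (i + L)) = lrsSeg cs L i := rfl
  rw [hsl, hfrom, hseg]
  have hiff : (PySem.Chars.isIn (List.take L.toNat (List.drop i.toNat cs))
        (List.drop (i.toNat + L.toNat) cs) = true) ↔
      ((PySem.List.pyRange (i + L) ((PySem.Chars.len cs) - L + 1)).filter
        (fun j => lrsSeg cs L j == lrsSeg cs L i)) ≠ [] := by
    rw [lrs_core cs L.toNat i.toNat (by omega) hbound, Ne, List.filter_eq_nil_iff]
    push Not
    constructor
    · rintro ⟨j, h1, h2, h3⟩
      refine ⟨(j : Int), ?_, ?_⟩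
      · rw [PySem.List.mem_pyRange_one, hn]; omega
      · rw [lrs_seg_eq cs L (j : Int) (by omega) (by omega), hseg]
        simp only [Int.toNat_natCast, beq_iff_eq]
        exact h3
    · rintro ⟨j, hjm, hjp⟩
      rw [PySem.List.mem_pyRange_one, hn] at hjm
      refine ⟨j.toNat, by omega, by omega, ?_⟩
      rw [lrs_seg_eq cs L j (by omega) (by omega), hseg] at hjp
      simpa using hjp
  by_cases hc : PySem.Chars.isIn (List.take L.toNat (List.drop i.toNat cs))
      (List.drop (i.toNat + L.toNat) cs) = true
  · rw [if_pos hc]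
    have := hiff.mp hc
    cases hf : ((PySem.List.pyRange (i + L) ((PySem.Chars.len cs) - L + 1)).filter
        (fun j => lrsSeg cs L j == lrsSeg cs L i)) with
    | nil => exact absurd hf this
    | cons a t => rw [hseg] at hf; rw [hf]; rfl
  · rw [if_neg hc]
    have : ((PySem.List.pyRange (i + L) ((PySem.Chars.len cs) - L + 1)).filter
        (fun j => lrsSeg cs L j == lrsSeg cs L i)) = [] := by
      by_contra hne
      exact hc (hiff.mpr hne)
    rw [hseg] at this; rw [this]; rfl

-- one step of Python's max scan, specialised to key=len
def lrsStep (acc : Option (List Char)) (x : List Char) : Option (List Char) :=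
  match acc with
  | none => some x
  | some m => if m.length < x.length then some x else some m

theorem lrs_max?_eq (xs : List (List Char)) :
    PySem.List.max? xs (fun s => s.length) = xs.foldl lrsStep none := by
  unfold PySem.List.max?
  congr 1
  funext acc x
  cases acc <;> rfl

-- over a block of constant key K the scan keeps its first element (or a previous shorter winner is replaced)
theorem lrs_fold_block (K : Nat) (b : List (List Char)) (hb : ∀ y ∈ b, y.length = K)
    (acc : Option (List Char)) (hacc : ∀ m ∈ acc, m.length < K) :
    b.foldl lrsStep acc = (b.head?).or acc := by
  have stay : ∀ (t : List (List Char)), (∀ y ∈ t, y.length = K) → ∀ m, K ≤ m.length →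
      t.foldl lrsStep (some m) = some m := by
    intro t
    induction t with
    | nil => intro _ m _; rfl
    | cons y ys ih =>
      intro h m hm
      have hy : y.length = K := h y (by simp)
      simp only [List.foldl_cons]
      rw [show lrsStep (some m) y = some m by
        show (if m.length < y.length then some y else some m) = some m; rw [if_neg]; omega]
      exact ih (fun z hz => h z (by simp [hz])) m hm
  cases b with
  | nil => simp
  | cons y t =>
    have hy : y.length = K := hb y (by simp)
    cases acc with
    | none =>
      simp only [List.foldl_cons]
      rw [show lrsStep none y = some y from rfl,
        stay t (fun z hz => hb z (by simp [hz])) y (by omega)]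
      rfl
    | some m =>
      have hm := hacc m (by simp)
      simp only [List.foldl_cons]
      rw [show lrsStep (some m) y = some y by
        show (if m.length < y.length then some y else some m) = some y; rw [if_pos]; omega,
        stay t (fun z hz => hb z (by simp [hz])) y (by omega)]
      rfl

-- max(key=len) over blocks of lengths 2, 3, 4 = first element of the last nonempty block
theorem lrs_max_triple (b2 b3 b4 : List (List Char))
    (h2 : ∀ x ∈ b2, x.length = 2) (h3 : ∀ x ∈ b3, x.length = 3) (h4 : ∀ x ∈ b4, x.length = 4) :
    PySem.List.max? (b2 ++ b3 ++ b4) (fun s => s.length) =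
      (b4.head?).or ((b3.head?).or (b2.head?)) := by
  rw [lrs_max?_eq, List.foldl_append, List.foldl_append]
  rw [lrs_fold_block 2 b2 h2 none (by simp)]
  rw [lrs_fold_block 3 b3 h3 _ (by
    intro m hm
    rcases Option.or_eq_some_iff.mp hm with h' | ⟨_, h'⟩
    · have := h2 m (List.mem_of_mem_head? h'); omega
    · simp at h')]
  rw [lrs_fold_block 4 b4 h4 _ (by
    intro m hm
    rcases Option.or_eq_some_iff.mp hm with h' | ⟨_, h'⟩
    · have := h3 m (List.mem_of_mem_head? h'); omega
    · rcases Option.or_eq_some_iff.mp h' with h'' | ⟨_, h''⟩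
      · have := h2 m (List.mem_of_mem_head? h''); omega
      · simp at h'')]
  simp

-- ===== VERDICT (by name: the statement is the Claim_ definition above) =====
theorem Long_Repeat_Segment_spec : Claim_equal_Long_Repeat_Segment := by
  intro SEQ _
  unfold Spec_Long_Repeat_Segment
  rw [lrs_A_unfold,
    lrs_max_triple _ _ _ (by simpa using lrs_blk_len SEQ.toList 2 (by norm_num))
      (by simpa using lrs_blk_len SEQ.toList 3 (by norm_num))
      (by simpa using lrs_blk_len SEQ.toList 4 (by norm_num)),
    lrs_blk_head _ 2 (by norm_num), lrs_blk_head _ 3 (by norm_num), lrs_blk_head _ 4 (by norm_num)]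
  unfold Long_Repeat_Segment_alt
  cases h4 : lrsFind SEQ.toList 4 <;> cases h3 : lrsFind SEQ.toList 3 <;>
    cases h2 : lrsFind SEQ.toList 2 <;>
    simp [List.findSome?, h4, h3, h2, Option.or]
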